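-- pv_equiv track=rewrite | github.com/LarsZauberer/ReSketch | experiments/mnistdrawing1_0/environnment.py | _calc_dir_length
-- ===== SOURCE A (Python) =====
-- def _calc_dir_length(action):
--     dir_count = 1
--     length = 1
--     for i in range(200):
--         if abs(action) == i:
--             return dir_count, length, True
--
--         dir_count += 1
--         if dir_count >= 5:
--             dir_count = 1
--             length += 1
--
--     raise ValueError(f'Invalid action: {action}')
-- ===== SOURCE B (Python) =====
-- def _calc_dir_length(action):
--     n = abs(action)
--     if n < 200:
--         return n % 4 + 1, n // 4 + 1, True
--     raise ValueError(f'Invalid action: {action}')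
-- ===== Notes on version B (the rewrite author's own statement) =====
-- stated objective: simpler
-- what changed: Replaces the 200-iteration counting loop with the closed form (|action| % 4 + 1, |action| // 4 + 1, True).
import Mathlib
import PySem

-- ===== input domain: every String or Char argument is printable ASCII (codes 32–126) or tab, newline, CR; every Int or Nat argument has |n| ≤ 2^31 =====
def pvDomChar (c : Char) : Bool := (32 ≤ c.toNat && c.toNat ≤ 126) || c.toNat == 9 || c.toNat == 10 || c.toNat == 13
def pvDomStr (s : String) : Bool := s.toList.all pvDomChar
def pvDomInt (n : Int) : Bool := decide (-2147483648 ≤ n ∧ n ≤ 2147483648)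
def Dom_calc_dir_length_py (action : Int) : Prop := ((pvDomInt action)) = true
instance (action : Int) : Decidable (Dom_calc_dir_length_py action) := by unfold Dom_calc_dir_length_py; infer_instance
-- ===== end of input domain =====

-- B replaces A's 200-step counting loop with the closed form (|a| % 4 + 1, |a| // 4 + 1, True); objective: simpler.

-- ===== PORT A =====
-- Python abs
def pvAbs (a : Int) : Int := if a < 0 then -a else a

-- A's `for i in range(200)` loop with early return; [] = loop exhausted = ValueError
-- (outside Pre_, a dummy value is returned where Python raises)
def aLoop (action : Int) : List Int → Int → Int → Int × Int × Bool
  | [], _, _ => (0, 0, false)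
  | i :: rest, dir_count, length =>
    if pvAbs action = i then (dir_count, length, true)
    else
      let dir_count' := dir_count + 1
      if dir_count' ≥ 5 then aLoop action rest 1 (length + 1)
      else aLoop action rest dir_count' length

def calc_dir_length_py (action : Int) : Int × Int × Bool :=
  aLoop action (PySem.List.pyRange 0 200 1) 1 1

-- ===== PORT B =====
def calc_dir_length_py_alt (action : Int) : Int × Int × Bool :=
  let n := pvAbs action
  if n < 200 then (PySem.Int.mod n 4 + 1, PySem.Int.floordiv n 4 + 1, true)
  else (0, 0, false)  -- Python raises ValueError here; outside Pre_

-- ===== PRECONDITION & SPEC =====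
-- A raises ValueError when |action| ≥ 200; exactly those inputs are excluded.
def Pre_calc_dir_length_py (action : Int) : Prop := pvAbs action < 200
instance (action : Int) : Decidable (Pre_calc_dir_length_py action) := by unfold Pre_calc_dir_length_py; infer_instance
def pvWitness_calc_dir_length_py : Int := 7

def Spec_calc_dir_length_py (action : Int) (out : Int × Int × Bool) : Prop := out = calc_dir_length_py_alt action
instance (action : Int) (out : Int × Int × Bool) : Decidable (Spec_calc_dir_length_py action out) := by unfold Spec_calc_dir_length_py; infer_instance

-- ===== CLAIM (what is proved, stated in full; the proofs are below) =====
def Claim_equal_calc_dir_length_py : Prop := ∀ (action : Int), Dom_calc_dir_length_py action → Pre_calc_dir_length_py action → Spec_calc_dir_length_py action (calc_dir_length_py action)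

-- ===== LEMMAS AND PROOFS =====

-- the loop only looks at `pvAbs action`
theorem aLoop_congr (a b : Int) (h : pvAbs a = pvAbs b) :
    ∀ (l : List Int) (dc len : Int), aLoop a l dc len = aLoop b l dc len := by
  intro l
  induction l with
  | nil => intro dc len; rfl
  | cons i rest ih =>
    intro dc len
    simp only [aLoop, h]
    split
    · rfl
    · split <;> exact ih _ _

theorem pvAbs_natAbs (a : Int) : pvAbs a = (a.natAbs : Int) := by
  unfold pvAbs; split_ifs <;> omega

set_option maxRecDepth 4000 in
set_option maxHeartbeats 2000000 in
theorem key : ∀ n : Nat, n < 200 →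
    aLoop (n : Int) (PySem.List.pyRange 0 200 1) 1 1 = calc_dir_length_py_alt (n : Int) := by
  decide

-- ===== VERDICT (by name: the statement is the Claim_ definition above) =====
theorem calc_dir_length_py_spec : Claim_equal_calc_dir_length_py := by
  intro action _ hpre
  unfold Spec_calc_dir_length_py
  have habs : pvAbs action = (action.natAbs : Int) := pvAbs_natAbs action
  have hn : action.natAbs < 200 := by
    have := hpre; unfold Pre_calc_dir_length_py at this; omega
  have hc : calc_dir_length_py action = aLoop (action.natAbs : Int) (PySem.List.pyRange 0 200 1) 1 1 := by
    unfold calc_dir_length_py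
    exact aLoop_congr _ _ (by rw [habs, pvAbs_natAbs]; omega) _ _ _
  have halt : calc_dir_length_py_alt (action.natAbs : Int) = calc_dir_length_py_alt action := by
    unfold calc_dir_length_py_alt
    rw [habs, pvAbs_natAbs ((action.natAbs : Nat) : Int)]
    simp
  rw [hc, key action.natAbs hn, halt]
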